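-- pv_equiv track=rewrite | github.com/SatyaanM/foobar | challenge1/solution.py | solution
-- ===== SOURCE A (Python) =====
-- def solution(s):
--     # Your code here
--     part = ""
--     num_equal = []
--     for i in range(len(s)):
--         part += s[i]
--         if (len(part) * s.count(part) == len(s)):
--             num_equal.append(s.count(part))
--     return max(num_equal)
-- ===== SOURCE B (Python) =====
-- def solution(s):
--     n = len(s)
--     d = 1
--     while d <= n:
--         if n % d == 0 and s[:d] * (n // d) == s:
--             return n // d
--         d += 1
--     return 0
-- ===== Notes on version B (the rewrite author's own statement) =====
-- stated objective: faster
-- what changed: Instead of growing every prefix and calling s.count on each (a quadratic scan per prefix), B scans d = 1..n in increasing order and returns n//d for the first d that divides n and whose length-d prefix tiles the string.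
-- outside the precondition, e.g. on solution(''): A raises ValueError, B returns 0
import Mathlib
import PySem

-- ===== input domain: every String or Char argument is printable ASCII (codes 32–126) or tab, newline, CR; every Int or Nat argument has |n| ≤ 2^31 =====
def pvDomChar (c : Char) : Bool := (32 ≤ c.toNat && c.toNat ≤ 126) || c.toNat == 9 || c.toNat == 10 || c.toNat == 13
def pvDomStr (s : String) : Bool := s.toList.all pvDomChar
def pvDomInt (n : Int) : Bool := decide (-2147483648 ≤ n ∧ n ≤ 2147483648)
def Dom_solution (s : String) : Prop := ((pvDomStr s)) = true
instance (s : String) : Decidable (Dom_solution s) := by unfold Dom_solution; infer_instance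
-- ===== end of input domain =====

-- B replaces A's grow-every-prefix-and-count scan by a scan over the divisors of len(s):
-- it returns len(s)//d for the smallest d whose length-d prefix tiles the string (objective: faster).

-- ===== PORT A =====
-- A's loop body: part += s[i]; if len(part) * s.count(part) == len(s): num_equal.append(s.count(part))
def solutionStep (cs : List Char) (st : List Char × List Int) (i : Int) : List Char × List Int :=
  let part := st.1 ++ [PySem.List.pyGetD cs i ' ']
  if PySem.List.len part * (PySem.Chars.count cs part : Int) == PySem.List.len cs then
    (part, st.2 ++ [(PySem.Chars.count cs part : Int)])
  else
    (part, st.2)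

-- strings are carried as List Char; s.count / len / s[i] are the exact PySem.Chars/List primitives
def solution (s : String) : Int :=
  let cs := s.toList
  let r := (PySem.List.pyRange 0 (PySem.List.len cs) 1).foldl (solutionStep cs) ([], [])
  -- Python's max() raises ValueError on an empty list (only for s = ""); Pre_solution excludes that input
  (PySem.List.max? r.2 (fun x => x)).getD 0

-- ===== PORT B =====
-- B's while loop: d runs 1..n; the first d with n % d == 0 and s[:d] * (n // d) == s wins
def solutionAltGo (cs : List Char) (n : Nat) (d : Nat) : Int :=
  if d ≤ n then
    if PySem.Int.mod (n : Int) (d : Int) == 0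
        && (PySem.List.pyRepeat (PySem.List.slice cs none (some (d : Int))) (PySem.Int.floordiv (n : Int) (d : Int)) == cs) then
      PySem.Int.floordiv (n : Int) (d : Int)
    else solutionAltGo cs n (d + 1)
  else 0
termination_by n + 1 - d

def solution_alt (s : String) : Int :=
  let cs := s.toList
  solutionAltGo cs cs.length 1

-- ===== PRECONDITION & SPEC =====
-- Pre_ excludes only s = "", where A's max([]) raises ValueError.
def Pre_solution (s : String) : Prop := s ≠ ""
instance (s : String) : Decidable (Pre_solution s) := by unfold Pre_solution; infer_instance
def pvWitness_solution : String := "abab"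

def Spec_solution (s : String) (out : Int) : Prop := out = solution_alt s
instance (s : String) (out : Int) : Decidable (Spec_solution s out) := by unfold Spec_solution; infer_instance

-- ===== CLAIM (what is proved, stated in full; the proofs are below) =====
def Claim_equal_solution : Prop := ∀ (s : String), Dom_solution s → Pre_solution s → Spec_solution s (solution s)

-- ===== LEMMAS AND PROOFS =====

-- "d tiles cs": d divides |cs| and cs is the length-d prefix repeated |cs|/d times
def Tiles (cs : List Char) (d : Nat) : Prop :=
  d ∣ cs.length ∧ cs = (List.replicate (cs.length / d) (List.take d cs)).flatten

-- the values A appends, over a list of loop indices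
def numEq (cs : List Char) (js : List Nat) : List Int :=
  js.filterMap (fun j =>
    if (j + 1) * PySem.Chars.count cs (List.take (j + 1) cs) = cs.length
    then some ((PySem.Chars.count cs (List.take (j + 1) cs) : Int)) else none)

-- step equations of the greedy non-overlapping counter PySem.Chars.count.go
theorem go_zero (sub l : List Char) (acc : Nat) : PySem.Chars.count.go sub 0 l acc = acc := by
  cases l <;> rfl
theorem go_nil (sub : List Char) (fuel acc : Nat) : PySem.Chars.count.go sub (fuel + 1) [] acc = acc := rfl
theorem go_cons (sub : List Char) (fuel : Nat) (h : Char) (t : List Char) (acc : Nat) :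
    PySem.Chars.count.go sub (fuel + 1) (h :: t) acc =
      if sub.isPrefixOf (h :: t) then PySem.Chars.count.go sub fuel ((h :: t).drop sub.length) (acc + 1)
      else PySem.Chars.count.go sub fuel t acc := rfl

theorem go_acc (sub : List Char) :
    ∀ (fuel : Nat) (l : List Char) (acc : Nat),
      PySem.Chars.count.go sub fuel l acc = PySem.Chars.count.go sub fuel l 0 + acc := by
  intro fuel
  induction fuel with
  | zero => intro l acc; rw [go_zero, go_zero]; omega
  | succ f ih =>
    intro l acc
    cases l with
    | nil => rw [go_nil, go_nil]; omega
    | cons h t =>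
      rw [go_cons, go_cons]
      split
      · rw [ih _ (acc + 1), ih _ (0 + 1)]; omega
      · rw [ih t acc]

theorem go_rep (sub : List Char) (hs : sub ≠ []) :
    ∀ (k fuel acc : Nat), k * sub.length ≤ fuel →
      PySem.Chars.count.go sub fuel ((List.replicate k sub).flatten) acc = acc + k := by
  intro k
  induction k with
  | zero =>
    intro fuel acc _
    simp only [List.replicate_zero, List.flatten_nil]
    cases fuel with
    | zero => rw [go_zero]; omega
    | succ f => rw [go_nil]; omega
  | succ k ih =>
    intro fuel acc hf
    have hl : 1 ≤ sub.length := List.length_pos_of_ne_nil hs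
    have hf1 : 1 ≤ fuel := by nlinarith
    obtain ⟨f, rfl⟩ : ∃ f, fuel = f + 1 := ⟨fuel - 1, by omega⟩
    have hrep : (List.replicate (k+1) sub).flatten = sub ++ (List.replicate k sub).flatten := by
      rw [List.replicate_succ, List.flatten_cons]
    rw [hrep]
    obtain ⟨c, cs, rfl⟩ : ∃ c cs, sub = c :: cs := by
      cases sub with
      | nil => exact absurd rfl hs
      | cons c cs => exact ⟨c, cs, rfl⟩
    rw [List.cons_append, go_cons, ← List.cons_append]
    have hpre : (c :: cs).isPrefixOf ((c :: cs) ++ (List.replicate k (c :: cs)).flatten) = true := by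
      rw [List.isPrefixOf_iff_prefix]
      exact ⟨(List.replicate k (c :: cs)).flatten, rfl⟩
    rw [if_pos hpre]
    rw [List.drop_append_of_le_length (le_refl _), List.drop_length, List.nil_append]
    rw [ih f (acc + 1) (by nlinarith [hf, hl])]
    omega

theorem go_main (sub : List Char) (hs : sub ≠ []) :
    ∀ (fuel : Nat) (l : List Char), l.length ≤ fuel →
      PySem.Chars.count.go sub fuel l 0 * sub.length ≤ l.length ∧
      (PySem.Chars.count.go sub fuel l 0 * sub.length = l.length →
        l = (List.replicate (PySem.Chars.count.go sub fuel l 0) sub).flatten) := by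
  intro fuel
  have hl : 1 ≤ sub.length := List.length_pos_of_ne_nil hs
  induction fuel with
  | zero =>
    intro l hlen
    have : l = [] := List.eq_nil_of_length_eq_zero (by omega)
    subst this
    rw [go_zero]
    exact ⟨by simp, fun _ => by simp⟩
  | succ f ih =>
    intro l hlen
    cases l with
    | nil => rw [go_nil]; exact ⟨by simp, fun _ => by simp⟩
    | cons h t =>
      rw [go_cons]
      by_cases hp : sub.isPrefixOf (h :: t) = true
      · rw [if_pos hp]
        rw [List.isPrefixOf_iff_prefix] at hp
        obtain ⟨r, hr⟩ := hp
        have hdrop : (h :: t).drop sub.length = r := by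
          rw [← hr, List.drop_append_of_le_length (le_refl _), List.drop_length, List.nil_append]
        have hlenht : (h :: t).length = sub.length + r.length := by rw [← hr]; simp
        have hrf : r.length ≤ f := by omega
        obtain ⟨hle, heq⟩ := ih r hrf
        rw [go_acc, hdrop]
        simp only [Nat.zero_add]
        set c := PySem.Chars.count.go sub f r 0 with hc
        constructor
        · have : (c + 1) * sub.length = c * sub.length + sub.length := by ring
          omega
        · intro he
          have hce : c * sub.length = r.length := by
            have : (c + 1) * sub.length = c * sub.length + sub.length := by ring
            omega
          have := heq hce
          rw [List.replicate_succ, List.flatten_cons, ← hr, ← this]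
      · rw [if_neg hp]
        obtain ⟨hle, heq⟩ := ih t (by simpa using Nat.lt_succ_iff.mp (by simpa using hlen))
        constructor
        · simp; omega
        · intro he
          exfalso
          simp at he
          omega

theorem count_eq_go (cs sub : List Char) (h : sub ≠ []) :
    PySem.Chars.count cs sub = PySem.Chars.count.go sub cs.length cs 0 := by
  rw [PySem.Chars.count, if_neg (by simp [h])]

theorem cond_iff (cs : List Char) (d : Nat) (hd : 1 ≤ d) (hdn : d ≤ cs.length) :
    (d * PySem.Chars.count cs (List.take d cs) = cs.length ↔ Tiles cs d) ∧
    (Tiles cs d → PySem.Chars.count cs (List.take d cs) = cs.length / d) := by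
  have tl : (List.take d cs).length = d := by rw [List.length_take]; omega
  have tne : List.take d cs ≠ [] := by
    intro h; rw [h] at tl; simp at tl; omega
  have hcount : PySem.Chars.count cs (List.take d cs)
      = PySem.Chars.count.go (List.take d cs) cs.length cs 0 := count_eq_go cs _ tne
  have hrep : Tiles cs d → PySem.Chars.count cs (List.take d cs) = cs.length / d := by
    intro ⟨hdvd, htile⟩
    rw [hcount, congrArg (fun l => PySem.Chars.count.go (List.take d cs) cs.length l 0) htile]
    rw [go_rep _ tne _ _ _ (by rw [tl]; exact Nat.div_mul_le_self _ _)]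
    omega
  refine ⟨⟨fun h => ?_, fun ht => ?_⟩, hrep⟩
  · rw [hcount] at h
    obtain ⟨hle, heq⟩ := go_main _ tne cs.length cs (le_refl _)
    rw [tl] at hle heq
    set c := PySem.Chars.count.go (List.take d cs) cs.length cs 0 with hc
    have hcd : c * d = cs.length := by rw [Nat.mul_comm]; exact h
    have hdvd : d ∣ cs.length := ⟨c, h.symm⟩
    have hcdiv : c = cs.length / d := by
      rw [← hcd, Nat.mul_div_cancel _ (by omega)]
    exact ⟨hdvd, by rw [← hcdiv]; exact heq hcd⟩
  · rw [hrep ht, Nat.mul_div_cancel' ht.1]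

theorem take_succ_getD (cs : List Char) (j : Nat) (hj : j < cs.length) :
    List.take j cs ++ [cs.getD j ' '] = List.take (j + 1) cs := by
  rw [List.take_add_one, List.getD_eq_getElem?_getD, List.getElem?_eq_getElem hj]
  rfl

theorem step_eq (cs : List Char) (j : Nat) (hj : j < cs.length) (acc : List Int) :
    solutionStep cs (List.take j cs, acc) (j : Int) =
      (List.take (j + 1) cs,
        acc ++ (if (j + 1) * PySem.Chars.count cs (List.take (j + 1) cs) = cs.length
          then [(PySem.Chars.count cs (List.take (j + 1) cs) : Int)] else [])) := by
  unfold solutionStep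
  simp only [PySem.List.pyGetD_natCast, take_succ_getD cs j hj, PySem.List.len_eq]
  have hlt : (List.take (j+1) cs).length = j + 1 := by rw [List.length_take]; omega
  rw [hlt]
  by_cases h : (j + 1) * PySem.Chars.count cs (List.take (j + 1) cs) = cs.length
  · rw [if_pos (by simp only [beq_iff_eq]; exact_mod_cast h), if_pos h]
  · rw [if_neg (by simp only [beq_iff_eq]; intro hc; exact h (by exact_mod_cast hc)), if_neg h]
    simp

theorem foldA (cs : List Char) :
    ∀ (k j : Nat) (acc : List Int), j + k ≤ cs.length →
      ((List.range' j k).map Int.ofNat).foldl (solutionStep cs) (List.take j cs, acc)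
        = (List.take (j + k) cs, acc ++ numEq cs (List.range' j k)) := by
  intro k
  induction k with
  | zero => intro j acc _; simp [numEq]
  | succ k ih =>
    intro j acc hjk
    rw [List.range'_succ, List.map_cons, List.foldl_cons,
      show Int.ofNat j = (j : Int) from rfl, step_eq cs j (by omega) acc]
    rw [ih (j+1) _ (by omega)]
    simp only [Prod.mk.injEq]
    constructor
    · congr 1; omega
    · rw [show numEq cs (j :: List.range' (j + 1) k)
            = (if (j + 1) * PySem.Chars.count cs (List.take (j + 1) cs) = cs.length
                then [(PySem.Chars.count cs (List.take (j + 1) cs) : Int)] else [])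
              ++ numEq cs (List.range' (j + 1) k) by
          rw [numEq, List.filterMap_cons]
          by_cases h : (j + 1) * PySem.Chars.count cs (List.take (j + 1) cs) = cs.length
          · rw [if_pos h, if_pos h]; rfl
          · rw [if_neg h, if_neg h]; rfl]
      rw [numEq, List.append_assoc]

theorem altGo_cond (cs : List Char) (d : Nat) :
    (PySem.Int.mod ((cs.length : Nat) : Int) (d : Int) == 0
      && (PySem.List.pyRepeat (PySem.List.slice cs none (some (d : Int))) (PySem.Int.floordiv ((cs.length : Nat) : Int) (d : Int)) == cs)) = true
    ↔ Tiles cs d := by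
  rw [Bool.and_eq_true, beq_iff_eq, beq_iff_eq, PySem.Int.mod_natCast,
    PySem.Int.floordiv_natCast, PySem.List.slice_to_natCast, Tiles, PySem.List.pyRepeat]
  rw [Int.toNat_natCast]
  constructor
  · rintro ⟨h1, h2⟩
    exact ⟨Nat.dvd_of_mod_eq_zero (by exact_mod_cast h1), h2.symm⟩
  · rintro ⟨h1, h2⟩
    exact ⟨by exact_mod_cast Nat.mod_eq_zero_of_dvd h1, h2.symm⟩

theorem tiles_length (cs : List Char) (h : cs ≠ []) : Tiles cs cs.length := by
  refine ⟨dvd_refl _, ?_⟩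
  rw [Nat.div_self (List.length_pos_of_ne_nil h), List.take_length]
  simp

theorem tiles_pos (cs : List Char) (d : Nat) (h : cs ≠ []) (ht : Tiles cs d) : 1 ≤ d := by
  rcases Nat.eq_zero_or_pos d with h0 | h1
  · subst h0
    have := ht.1
    have hlen := List.length_pos_of_ne_nil h
    omega
  · exact h1

theorem altGo_run (cs : List Char) :
    ∀ (dm d : Nat), 1 ≤ d → d ≤ dm → dm ≤ cs.length → Tiles cs dm →
      (∀ e, d ≤ e → e < dm → ¬ Tiles cs e) →
      solutionAltGo cs cs.length d = ((cs.length / dm : Nat) : Int) := by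
  intro dm
  have H : ∀ (k d : Nat), dm - d ≤ k → 1 ≤ d → d ≤ dm → dm ≤ cs.length → Tiles cs dm →
      (∀ e, d ≤ e → e < dm → ¬ Tiles cs e) →
      solutionAltGo cs cs.length d = ((cs.length / dm : Nat) : Int) := by
    intro k
    induction k with
    | zero =>
      intro d hk h1 hdm hdmn ht _
      have : d = dm := by omega
      subst this
      rw [solutionAltGo, if_pos (by omega), if_pos ((altGo_cond cs d).mpr ht),
        PySem.Int.floordiv_natCast]
    | succ k ih =>
      intro d hk h1 hdm hdmn ht hmin
      by_cases hde : d = dm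
      · subst hde
        rw [solutionAltGo, if_pos (by omega), if_pos ((altGo_cond cs d).mpr ht),
          PySem.Int.floordiv_natCast]
      · have hlt : d < dm := by omega
        rw [solutionAltGo, if_pos (by omega),
          if_neg (by
            intro hc
            exact hmin d (le_refl _) hlt ((altGo_cond cs d).mp hc))]
        exact ih (d + 1) (by omega) (by omega) (by omega) hdmn ht
          (fun e he1 he2 => hmin e (by omega) he2)
  exact fun d h1 h2 h3 h4 h5 => H (dm - d) d (le_refl _) h1 h2 h3 h4 h5

theorem mem_numEq_range (cs : List Char) (x : Int) :
    x ∈ numEq cs (List.range cs.length) ↔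
      ∃ d, 1 ≤ d ∧ d ≤ cs.length ∧ Tiles cs d ∧ x = ((cs.length / d : Nat) : Int) := by
  rw [numEq, List.mem_filterMap]
  constructor
  · rintro ⟨j, hj, hopt⟩
    rw [List.mem_range] at hj
    by_cases h : (j + 1) * PySem.Chars.count cs (List.take (j + 1) cs) = cs.length
    · rw [if_pos h, Option.some_inj] at hopt
      obtain ⟨hiff, hval⟩ := cond_iff cs (j + 1) (by omega) (by omega)
      have ht : Tiles cs (j + 1) := hiff.mp h
      exact ⟨j + 1, by omega, by omega, ht, by rw [← hopt, hval ht]⟩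
    · rw [if_neg h] at hopt; exact absurd hopt (by simp)
  · rintro ⟨d, hd1, hdn, ht, rfl⟩
    obtain ⟨hiff, hval⟩ := cond_iff cs d hd1 hdn
    refine ⟨d - 1, List.mem_range.mpr (by omega), ?_⟩
    have hd : d - 1 + 1 = d := by omega
    rw [hd, if_pos (hiff.mpr ht), hval ht]

theorem solution_eq_numEq (s : String) :
    solution s = (PySem.List.max? (numEq s.toList (List.range s.toList.length)) (fun x => x)).getD 0 := by
  rw [solution]
  have h1 : PySem.List.pyRange 0 (PySem.List.len s.toList) 1
      = (List.range' 0 s.toList.length).map Int.ofNat := by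
    rw [PySem.List.len_eq, PySem.List.pyRange_zero_natCast, ← List.range_eq_range']
    rfl
  rw [h1]
  have h2 := foldA s.toList s.toList.length 0 [] (by omega)
  rw [List.take_zero] at h2
  rw [h2, ← List.range_eq_range', List.nil_append]

theorem solution_spec_main (s : String) (hpre : s ≠ "") : solution s = solution_alt s := by
  set cs := s.toList with hcs
  have hne : cs ≠ [] := by simpa [hcs] using hpre
  have hn1 : 1 ≤ cs.length := List.length_pos_of_ne_nil hne
  haveI : DecidablePred (fun d => Tiles cs d) := Classical.decPred _
  have hex : ∃ d, Tiles cs d := ⟨cs.length, tiles_length cs hne⟩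
  set dm := Nat.find hex with hdm
  have htm : Tiles cs dm := Nat.find_spec hex
  have hmin : ∀ e, e < dm → ¬ Tiles cs e := fun e he => Nat.find_min hex he
  have hdm1 : 1 ≤ dm := tiles_pos cs dm hne htm
  have hdmn : dm ≤ cs.length := Nat.le_of_dvd (by omega) htm.1
  have hB : solution_alt s = ((cs.length / dm : Nat) : Int) := by
    rw [solution_alt]
    exact altGo_run cs dm 1 (le_refl _) hdm1 hdmn htm (fun e h1 h2 => hmin e h2)
  have hmem : ((cs.length / dm : Nat) : Int) ∈ numEq cs (List.range cs.length) :=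
    (mem_numEq_range cs _).mpr ⟨dm, hdm1, hdmn, htm, rfl⟩
  rw [solution_eq_numEq, ← hcs, hB]
  cases hmax : PySem.List.max? (numEq cs (List.range cs.length)) (fun x => x) with
  | none =>
    rw [PySem.List.max?_eq_none_iff] at hmax
    rw [hmax] at hmem
    exact absurd hmem (by simp)
  | some m =>
    have hm1 : m ∈ numEq cs (List.range cs.length) := PySem.List.max?_mem hmax
    have hle1 : ((cs.length / dm : Nat) : Int) ≤ m := PySem.List.max?_isMax hmax _ hmem
    obtain ⟨d, hd1, hdn, ht, rfl⟩ := (mem_numEq_range cs _).mp hm1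
    have hdmd : dm ≤ d := by
      by_contra hlt
      exact hmin d (by omega) ht
    have hle2 : cs.length / d ≤ cs.length / dm := Nat.div_le_div_left hdmd (by omega)
    have : ((cs.length / d : Nat) : Int) = ((cs.length / dm : Nat) : Int) := by
      have := Int.ofNat_le.mpr hle2
      omega
    rw [Option.getD_some, this]

-- ===== VERDICT (by name: the statement is the Claim_ definition above) =====
theorem solution_spec : Claim_equal_solution := by
  intro s _ hpre
  unfold Spec_solution
  exact solution_spec_main s hpre
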